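-- pv_equiv track=rewrite | github.com/NoahW314/psis-and-kostka-numbers | util.py | doesDominate
-- ===== SOURCE A (Python) =====
-- def doesDominate(dPartition, partition):
--     assert sum(partition) == sum(dPartition)
--     partRS = 0
--     dPartRS = 0
--     for i in range(min(len(partition),len(dPartition))):
--         partRS += partition[i]
--         dPartRS += dPartition[i]
--         if  partRS > dPartRS:
--             return False
--     return True
-- ===== SOURCE B (Python) =====
-- def doesDominate(dPartition, partition):
--     assert sum(partition) == sum(dPartition)
--     n = min(len(partition), len(dPartition))
--     return all(sum(partition[:i]) <= sum(dPartition[:i]) for i in range(1, n + 1))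
-- ===== Notes on version B (the rewrite author's own statement) =====
-- stated objective: simpler
-- what changed: Replaces the interleaved accumulating loop with early return by a single all(...) expression comparing whole prefix sums sum(xs[:i]) recomputed per index; no running state or explicit branch remains.
import Mathlib
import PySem

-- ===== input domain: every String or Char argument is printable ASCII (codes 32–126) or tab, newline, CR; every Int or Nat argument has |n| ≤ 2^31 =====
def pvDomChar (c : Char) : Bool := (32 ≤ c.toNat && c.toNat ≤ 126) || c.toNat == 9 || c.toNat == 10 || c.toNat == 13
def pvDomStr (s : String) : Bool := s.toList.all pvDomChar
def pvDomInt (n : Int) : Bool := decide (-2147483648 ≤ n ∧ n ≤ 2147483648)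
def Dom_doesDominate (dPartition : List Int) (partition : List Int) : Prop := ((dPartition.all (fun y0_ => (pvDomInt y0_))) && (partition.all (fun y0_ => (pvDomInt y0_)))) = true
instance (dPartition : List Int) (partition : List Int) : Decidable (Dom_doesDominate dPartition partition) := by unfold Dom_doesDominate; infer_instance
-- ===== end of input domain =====

-- B replaces A's accumulating early-return loop by an all(...) over whole prefix sums recomputed per index (simpler decomposition, not faster).


-- ===== PORT A =====
-- the for-loop with its early 'return False', as recursion over the range list with the two running sums
def doesDominateLoop (dPartition partition : List Int) (is : List Int) (partRS dPartRS : Int) : Bool :=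
  match is with
  | [] => true
  | i :: rest =>
    let partRS := partRS + ((PySem.List.pyGet? partition i).getD 0)
    let dPartRS := dPartRS + ((PySem.List.pyGet? dPartition i).getD 0)
    if partRS > dPartRS then false
    else doesDominateLoop dPartition partition rest partRS dPartRS

def doesDominate (dPartition : List Int) (partition : List Int) : Bool :=
  doesDominateLoop dPartition partition
    (PySem.List.pyRange 0 (min (partition.length : Int) (dPartition.length : Int)) 1) 0 0

-- ===== PORT B =====
def doesDominate_alt (dPartition : List Int) (partition : List Int) : Bool :=
  let n : Int := min (partition.length : Int) (dPartition.length : Int)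
  (PySem.List.pyRange 1 (n + 1) 1).all (fun i =>
    decide ((PySem.List.slice partition none (some i)).sum ≤ (PySem.List.slice dPartition none (some i)).sum))

-- ===== PRECONDITION & SPEC =====
-- Pre_ excludes exactly the inputs on which A's assert fails (AssertionError): unequal total sums.
def Pre_doesDominate (dPartition : List Int) (partition : List Int) : Prop :=
  partition.sum = dPartition.sum
instance (dPartition : List Int) (partition : List Int) : Decidable (Pre_doesDominate dPartition partition) := by unfold Pre_doesDominate; infer_instance
def pvWitness_doesDominate : List Int × List Int := ([2, 1], [1, 1, 1])

def Spec_doesDominate (dPartition : List Int) (partition : List Int) (out : Bool) : Prop := out = doesDominate_alt dPartition partition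
instance (dPartition : List Int) (partition : List Int) (out : Bool) : Decidable (Spec_doesDominate dPartition partition out) := by unfold Spec_doesDominate; infer_instance

-- ===== CLAIM (what is proved, stated in full; the proofs are below) =====
def Claim_equal_doesDominate : Prop := ∀ (dPartition : List Int) (partition : List Int), Dom_doesDominate dPartition partition → Pre_doesDominate dPartition partition → Spec_doesDominate dPartition partition (doesDominate dPartition partition)

-- ===== LEMMAS AND PROOFS =====

-- A's loop, started at index k with the running sums equal to the k-prefix sums,
-- decides "every prefix sum of partition up to n (beyond k) is ≤ the corresponding one of dPartition".
lemma doesDominateLoop_eq (dPartition partition : List Int) (n : Nat)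
    (hp : n ≤ partition.length) (hd : n ≤ dPartition.length) :
    ∀ (m k : Nat), k + m = n →
      doesDominateLoop dPartition partition (PySem.List.pyRange (k : Int) (n : Int) 1)
        ((partition.take k).sum) ((dPartition.take k).sum)
      = decide (∀ j : Nat, j ≤ n → k < j → (partition.take j).sum ≤ (dPartition.take j).sum) := by
  intro m
  induction m with
  | zero =>
    intro k hk
    rw [PySem.List.pyRange_one_eq_nil (by exact_mod_cast le_of_eq hk.symm)]
    simp only [doesDominateLoop]
    symm
    rw [decide_eq_true_iff]
    intro j h1 h2
    omega
  | succ m ih =>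
    intro k hk
    have hkn : k < n := by omega
    rw [PySem.List.pyRange_one_cons (by exact_mod_cast hkn)]
    have hkp : k < partition.length := lt_of_lt_of_le hkn hp
    have hkd : k < dPartition.length := lt_of_lt_of_le hkn hd
    simp only [doesDominateLoop, PySem.List.pyGet?_natCast, List.getElem?_eq_getElem hkp,
      List.getElem?_eq_getElem hkd, Option.getD_some]
    rw [← List.sum_take_succ partition k hkp, ← List.sum_take_succ dPartition k hkd]
    by_cases h : (partition.take (k + 1)).sum > (dPartition.take (k + 1)).sum
    · rw [if_pos h]
      symm
      rw [decide_eq_false_iff_not]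
      intro hall
      exact absurd (hall (k + 1) (by omega) (by omega)) (not_le.mpr h)
    · rw [if_neg h]
      have : ((k : Int) + 1) = ((k + 1 : Nat) : Int) := by push_cast; ring
      rw [this, ih (k + 1) (by omega)]
      congr 1
      apply propext
      constructor
      · intro hall j h1 h2
        rcases Nat.lt_or_ge (k + 1) j with h' | h'
        · exact hall j h1 h'
        · have : j = k + 1 := by omega
          subst this
          exact not_lt.mp h
      · intro hall j h1 h2
        exact hall j h1 (by omega)

-- ===== VERDICT (by name: the statement is the Claim_ definition above) =====
theorem doesDominate_spec : Claim_equal_doesDominate := by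
  intro dPartition partition _ _
  unfold Spec_doesDominate doesDominate doesDominate_alt
  set n : Nat := min partition.length dPartition.length with hn
  have hcast : min (partition.length : Int) (dPartition.length : Int) = (n : Int) := by
    simp [hn, Nat.cast_min]
  rw [hcast]
  have hA := doesDominateLoop_eq dPartition partition n (Nat.min_le_left _ _) (Nat.min_le_right _ _) n 0 (by omega)
  simp only [List.take_zero, List.sum_nil, Nat.cast_zero] at hA
  rw [hA, Bool.eq_iff_iff, decide_eq_true_iff, List.all_eq_true]
  constructor
  · intro hall i hi
    rw [PySem.List.mem_pyRange_one] at hi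
    obtain ⟨h1, h2⟩ := hi
    rw [decide_eq_true_iff]
    have hi : i = ((i.toNat : Nat) : Int) := by omega
    rw [hi, PySem.List.slice_to_natCast, PySem.List.slice_to_natCast]
    exact hall i.toNat (by omega) (by omega)
  · intro hall j h1 h2
    have := hall (j : Int) (by rw [PySem.List.mem_pyRange_one]; omega)
    rw [decide_eq_true_iff, PySem.List.slice_to_natCast, PySem.List.slice_to_natCast] at this
    exact this
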